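-- pv_equiv track=rewrite | github.com/Juanesjara/ST0247-002 | laboratorios/lab04/ejercicioEnLinea/busPrecio.py | horasExtra
-- ===== SOURCE A (Python) =====
-- def horasExtra(l1:list,l2:list,k:int,extra):
--     if l1 == []:
--         return(extra)
--     else:
--         min1 = min(l1)
--         max2 = max(l2)
--         l1.remove(min1)
--         l2.remove(max2)
--         resultado = int(min1) + int(max2)
--         precioExtra = resultado - k
--         if precioExtra <= 0:
--             return horasExtra(l1,l2,k,extra)
--         else:
--             return horasExtra(l1,l2,k,extra + precioExtra)
-- ===== SOURCE B (Python) =====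
-- def horasExtra(l1: list, l2: list, k: int, extra):
--     # Pair i-th smallest of l1 with i-th largest of l2; sum the positive surpluses.
--     # (Return value only: unlike A, this does not mutate l1/l2.)
--     total = extra
--     for a, b in zip(sorted(l1), sorted(l2, reverse=True)):
--         d = a + b - k
--         if d > 0:
--             total += d
--     return total
-- ===== Notes on version B (the rewrite author's own statement) =====
-- stated objective: faster
-- what changed: Replaced the recursive repeated min(l1)/max(l2)+remove passes by sorting l1 ascending and l2 descending once and summing max(0, a+b-k) over the zipped pairs.
import Mathlib
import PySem

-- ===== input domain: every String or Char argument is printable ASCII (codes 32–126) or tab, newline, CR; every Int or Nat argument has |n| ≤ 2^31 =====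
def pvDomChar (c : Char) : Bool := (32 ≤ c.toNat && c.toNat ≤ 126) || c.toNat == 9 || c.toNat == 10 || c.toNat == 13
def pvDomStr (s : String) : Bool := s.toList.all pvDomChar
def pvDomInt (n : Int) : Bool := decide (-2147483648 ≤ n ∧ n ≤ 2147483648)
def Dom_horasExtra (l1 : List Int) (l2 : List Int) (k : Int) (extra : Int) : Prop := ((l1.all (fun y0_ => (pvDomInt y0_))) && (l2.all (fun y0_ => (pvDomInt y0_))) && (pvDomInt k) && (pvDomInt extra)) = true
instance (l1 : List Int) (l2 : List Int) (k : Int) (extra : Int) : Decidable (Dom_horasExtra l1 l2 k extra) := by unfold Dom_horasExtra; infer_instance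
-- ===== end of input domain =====

-- B sorts l1 ascending and l2 descending once and sums the positive surpluses of zipped
-- pairs instead of A's recursive min/max + remove passes (equivalence is about the RETURN
-- value only: A mutates l1 and l2 in place, B does not).

-- ===== PORT A =====
def horasExtra (l1 : List Int) (l2 : List Int) (k : Int) (extra : Int) : Int :=
  if l1 = [] then extra
  else
    match hm : PySem.List.min? l1 (fun x => x), hM : PySem.List.max? l2 (fun x => x) with
    | some min1, some max2 =>
      -- l1.remove(min1); l2.remove(max2) — both succeed since min1 ∈ l1, max2 ∈ l2
      let l1' := (PySem.List.remove? l1 min1).getD l1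
      let l2' := (PySem.List.remove? l2 max2).getD l2
      let resultado := min1 + max2
      let precioExtra := resultado - k
      if precioExtra ≤ 0 then horasExtra l1' l2' k extra
      else horasExtra l1' l2' k (extra + precioExtra)
    | _, _ => 0  -- Python raises ValueError here (min/max of empty list; excluded by Pre_)
termination_by l1.length
decreasing_by
  all_goals
    simp only [PySem.List.remove?_eq_some_erase l1 min1 (PySem.List.min?_mem hm), Option.getD_some]
    have hne : l1 ≠ [] := by assumption
    have := List.length_erase_of_mem (PySem.List.min?_mem hm)
    cases l1 with
    | nil => exact absurd rfl hne
    | cons x t => simp at this ⊢; omega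

-- ===== PORT B =====
def horasExtra_alt (l1 : List Int) (l2 : List Int) (k : Int) (extra : Int) : Int :=
  ((PySem.List.sorted l1 (fun x => x) false).zip
      (PySem.List.sorted l2 (fun x => x) true)).foldl
    (fun total ab => if ab.1 + ab.2 - k > 0 then total + (ab.1 + ab.2 - k) else total)
    extra

-- ===== PRECONDITION & SPEC =====
-- A raises ValueError (max of empty list) iff l1 is longer than l2; Pre_ excludes exactly that.
def Pre_horasExtra (l1 : List Int) (l2 : List Int) (k : Int) (extra : Int) : Prop :=
  l1.length ≤ l2.length
instance (l1 : List Int) (l2 : List Int) (k : Int) (extra : Int) : Decidable (Pre_horasExtra l1 l2 k extra) := by unfold Pre_horasExtra; infer_instance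

def pvWitness_horasExtra : List Int × List Int × Int × Int := ([3, 1], [5, 2, 4], 4, 0)

def Spec_horasExtra (l1 : List Int) (l2 : List Int) (k : Int) (extra : Int) (out : Int) : Prop := out = horasExtra_alt l1 l2 k extra
instance (l1 : List Int) (l2 : List Int) (k : Int) (extra : Int) (out : Int) : Decidable (Spec_horasExtra l1 l2 k extra out) := by unfold Spec_horasExtra; infer_instance

-- ===== CLAIM (what is proved, stated in full; the proofs are below) =====
def Claim_equal_horasExtra : Prop := ∀ (l1 : List Int) (l2 : List Int) (k : Int) (extra : Int), Dom_horasExtra l1 l2 k extra → Pre_horasExtra l1 l2 k extra → Spec_horasExtra l1 l2 k extra (horasExtra l1 l2 k extra)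

-- ===== LEMMAS AND PROOFS =====

theorem sorted_min_cons (l : List Int) (m : Int)
    (hm : PySem.List.min? l (fun x => x) = some m) :
    PySem.List.sorted l (fun x => x) false = m :: PySem.List.sorted (l.erase m) (fun x => x) false := by
  apply PySem.List.sorted_id_eq_of_perm_of_pairwise
  · exact ((PySem.List.sorted_perm (l.erase m) (fun x => x) false).cons m).trans
      (List.perm_cons_erase (PySem.List.min?_mem hm)).symm
  · refine List.pairwise_cons.mpr ⟨?_, ?_⟩
    · intro y hy
      exact PySem.List.min?_isMin hm y (l.erase_subset ((PySem.List.mem_sorted _ _ _ y).mp hy))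
    · exact PySem.List.sorted_pairwise (l.erase m) (fun x => x)

theorem sorted_rev_eq_of_perm_of_pairwise_ge (xs ys : List Int)
    (hp : ys.Perm xs) (hs : ys.Pairwise (fun a b => b ≤ a)) :
    PySem.List.sorted xs (fun x => x) true = ys := by
  refine List.Perm.eq_of_pairwise (fun a b _ _ h1 h2 => le_antisymm h2 h1) ?_ hs
    ((PySem.List.sorted_perm xs (fun x => x) true).trans hp.symm)
  exact PySem.List.sorted_pairwise_rev xs (fun x => x)

theorem sorted_rev_max_cons (l : List Int) (m : Int)
    (hm : PySem.List.max? l (fun x => x) = some m) :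
    PySem.List.sorted l (fun x => x) true = m :: PySem.List.sorted (l.erase m) (fun x => x) true := by
  apply sorted_rev_eq_of_perm_of_pairwise_ge
  · exact ((PySem.List.sorted_perm (l.erase m) (fun x => x) true).cons m).trans
      (List.perm_cons_erase (PySem.List.max?_mem hm)).symm
  · refine List.pairwise_cons.mpr ⟨?_, ?_⟩
    · intro y hy
      exact PySem.List.max?_isMax hm y (l.erase_subset ((PySem.List.mem_sorted _ _ _ y).mp hy))
    · exact PySem.List.sorted_pairwise_rev (l.erase m) (fun x => x)

theorem alt_step (l1 l2 : List Int) (k extra min1 max2 : Int)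
    (hm : PySem.List.min? l1 (fun x => x) = some min1)
    (hM : PySem.List.max? l2 (fun x => x) = some max2) :
    horasExtra_alt l1 l2 k extra =
      horasExtra_alt (l1.erase min1) (l2.erase max2) k
        (if min1 + max2 - k > 0 then extra + (min1 + max2 - k) else extra) := by
  unfold horasExtra_alt
  rw [sorted_min_cons l1 min1 hm, sorted_rev_max_cons l2 max2 hM, List.zip_cons_cons,
    List.foldl_cons]

theorem horasExtra_eq_alt (l1 l2 : List Int) (k extra : Int)
    (h : l1.length ≤ l2.length) : horasExtra l1 l2 k extra = horasExtra_alt l1 l2 k extra := by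
  fun_induction horasExtra l1 l2 k extra with
  | case1 l2 extra =>
    simp [horasExtra_alt, PySem.List.sorted]
  | case2 l1 l2 extra hne min1 max2 hm hM l1' l2' resultado precioExtra hle ih =>
    simp only [l1', l2', resultado, precioExtra,
      PySem.List.remove?_eq_some_erase l1 min1 (PySem.List.min?_mem hm),
      PySem.List.remove?_eq_some_erase l2 max2 (PySem.List.max?_mem hM),
      Option.getD_some] at hle ih ⊢
    rw [alt_step l1 l2 k extra min1 max2 hm hM, if_neg (by omega)]
    refine ih ?_
    have e1 := List.length_erase_of_mem (PySem.List.min?_mem hm)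
    have e2 := List.length_erase_of_mem (PySem.List.max?_mem hM)
    have h1 : l1.length ≠ 0 := by simpa [List.length_eq_zero_iff] using hne
    omega
  | case3 l1 l2 extra hne min1 max2 hm hM l1' l2' resultado precioExtra hgt ih =>
    simp only [l1', l2', resultado, precioExtra,
      PySem.List.remove?_eq_some_erase l1 min1 (PySem.List.min?_mem hm),
      PySem.List.remove?_eq_some_erase l2 max2 (PySem.List.max?_mem hM),
      Option.getD_some] at hgt ih ⊢
    rw [alt_step l1 l2 k extra min1 max2 hm hM, if_pos (by omega)]
    refine ih ?_
    have e1 := List.length_erase_of_mem (PySem.List.min?_mem hm)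
    have e2 := List.length_erase_of_mem (PySem.List.max?_mem hM)
    have h1 : l1.length ≠ 0 := by simpa [List.length_eq_zero_iff] using hne
    omega
  | case4 l1 l2 extra hne hnone =>
    exfalso
    cases hm : PySem.List.min? l1 (fun x => x) with
    | none => exact hne ((PySem.List.min?_eq_none_iff l1 (fun x => x)).mp hm)
    | some m =>
      cases hM : PySem.List.max? l2 (fun x => x) with
      | none =>
        have : l2 = [] := (PySem.List.max?_eq_none_iff l2 (fun x => x)).mp hM
        subst this
        exact hne (by simpa using h)
      | some M => exact hnone m M hm hM

-- ===== VERDICT (by name: the statement is the Claim_ definition above) =====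
theorem horasExtra_spec : Claim_equal_horasExtra := by
  intro l1 l2 k extra _ hpre
  unfold Spec_horasExtra
  exact horasExtra_eq_alt l1 l2 k extra hpre
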